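-- pv_equiv track=rewrite | github.com/JAHAVL/RAI_Chat | backend/utils/path_finder.py | suggest_replacements
-- ===== SOURCE A (Python) =====
-- def suggest_replacements(results):
--     """Suggest replacements for common patterns"""
--     suggestions = {}
--
--     for file, paths in results.items():
--         file_suggestions = []
--
--         for path in paths:
--             suggestion = None
--
--             # Try to identify common patterns
--             if '/videos/' in path or '/video/' in path:
--                 rel_path = path.split('/videos/')[-1] if '/videos/' in path else path.split('/video/')[-1]
--                 suggestion = f'AppConfig.get_path("video/{rel_path}")'
--             elif '/memory/' in path:
--                 rel_path = path.split('/memory/')[-1]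
--                 suggestion = f'AppConfig.get_path("memory/{rel_path}")'
--             elif '/temp/' in path or '/tmp/' in path:
--                 rel_path = path.split('/temp/')[-1] if '/temp/' in path else path.split('/tmp/')[-1]
--                 suggestion = f'AppConfig.get_path("temp/{rel_path}")'
--             elif '/sessions/' in path:
--                 rel_path = path.split('/sessions/')[-1]
--                 suggestion = f'AppConfig.get_path("session/{rel_path}")'
--
--             if suggestion:
--                 file_suggestions.append((path, suggestion))
--
--         if file_suggestions:
--             suggestions[file] = file_suggestions
--
--     return suggestions
-- ===== SOURCE B (Python) =====
-- _TABLE = [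
--     ('/videos/', 'video/'),
--     ('/video/', 'video/'),
--     ('/memory/', 'memory/'),
--     ('/temp/', 'temp/'),
--     ('/tmp/', 'temp/'),
--     ('/sessions/', 'session/'),
-- ]
--
--
-- def suggest_replacements(results):
--     out = {}
--     for file, paths in results.items():
--         # marker-major staged passes: one pass per marker fills still-empty slots
--         slots = [(p, None) for p in paths]
--         for marker, label in _TABLE:
--             slots = [(p, s if s is not None else
--                       (f'AppConfig.get_path("{label}{p.split(marker)[-1]}")'
--                        if marker in p else None))
--                      for p, s in slots]
--         pairs = [(p, s) for p, s in slots if s is not None]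
--         if pairs:
--             out[file] = pairs
--     return out
-- ===== Notes on version B (the rewrite author's own statement) =====
-- stated objective: alternative
-- what changed: Swaps the loop nesting: instead of A's per-path if/elif chain scanned once per path, B runs six marker-major staged passes over a list of Optional suggestion slots, each pass filling only the still-empty slots, then collects the filled slots.
import Mathlib
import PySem

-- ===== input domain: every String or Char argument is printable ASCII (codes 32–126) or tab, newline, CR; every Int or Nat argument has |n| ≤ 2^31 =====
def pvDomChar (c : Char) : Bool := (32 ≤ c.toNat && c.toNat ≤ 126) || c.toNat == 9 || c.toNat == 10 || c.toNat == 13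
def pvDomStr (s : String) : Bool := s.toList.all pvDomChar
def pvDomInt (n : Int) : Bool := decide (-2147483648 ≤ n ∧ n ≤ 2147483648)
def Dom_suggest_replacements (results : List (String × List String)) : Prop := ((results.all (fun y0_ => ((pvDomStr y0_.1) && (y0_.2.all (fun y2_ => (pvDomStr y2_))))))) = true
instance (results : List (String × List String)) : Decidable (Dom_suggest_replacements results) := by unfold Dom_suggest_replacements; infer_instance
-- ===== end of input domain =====

-- B replaces A's per-path if/elif chain by six marker-major staged passes that fill
-- Optional suggestion slots (objective: alternative decomposition; not faster).

-- ===== PORT A =====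
-- per-path if/elif chain of A, step for step
def pvSuggA (path : String) : Option String :=
  if PySem.Str.isIn "/videos/" path || PySem.Str.isIn "/video/" path then
    let rel := if PySem.Str.isIn "/videos/" path
               then (((PySem.Str.split? path "/videos/").getD [])).getLastD ""
               else (((PySem.Str.split? path "/video/").getD [])).getLastD ""
    some ("AppConfig.get_path(\"video/" ++ rel ++ "\")")
  else if PySem.Str.isIn "/memory/" path then
    some ("AppConfig.get_path(\"memory/" ++ (((PySem.Str.split? path "/memory/").getD [])).getLastD "" ++ "\")")
  else if PySem.Str.isIn "/temp/" path || PySem.Str.isIn "/tmp/" path then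
    let rel := if PySem.Str.isIn "/temp/" path
               then (((PySem.Str.split? path "/temp/").getD [])).getLastD ""
               else (((PySem.Str.split? path "/tmp/").getD [])).getLastD ""
    some ("AppConfig.get_path(\"temp/" ++ rel ++ "\")")
  else if PySem.Str.isIn "/sessions/" path then
    some ("AppConfig.get_path(\"session/" ++ (((PySem.Str.split? path "/sessions/").getD [])).getLastD "" ++ "\")")
  else none

def suggest_replacements (results : List (String × List String)) : List (String × List (String × String)) :=
  (results.foldl (fun suggestions fp =>
      let file_suggestions := fp.2.foldl (fun acc path =>
          match pvSuggA path with
          | some s => acc ++ [(path, s)]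
          | none => acc) []
      if file_suggestions.isEmpty then suggestions
      else suggestions.insert fp.1 file_suggestions)
    PySem.Dict.empty).items

-- ===== PORT B =====
def pvTable : List (String × String) :=
  [("/videos/", "video/"), ("/video/", "video/"), ("/memory/", "memory/"),
   ("/temp/", "temp/"), ("/tmp/", "temp/"), ("/sessions/", "session/")]

-- one staged pass of Source B: fill the still-empty slots that contain this marker
def pvPass (ml : String × String) (slots : List (String × Option String)) :
    List (String × Option String) :=
  slots.map (fun ps =>
    (ps.1, match ps.2 with
           | some s => some s
           | none =>
               if PySem.Str.isIn ml.1 ps.1 then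
                 some ("AppConfig.get_path(\"" ++ ml.2 ++
                       (((PySem.Str.split? ps.1 ml.1).getD []).getLastD "") ++ "\")")
               else none))

def pvFilePairs (paths : List String) : List (String × String) :=
  let slots := pvTable.foldl (fun slots ml => pvPass ml slots)
                 (paths.map (fun p => (p, (none : Option String))))
  slots.filterMap (fun ps => ps.2.map (fun s => (ps.1, s)))

def suggest_replacements_alt (results : List (String × List String)) : List (String × List (String × String)) :=
  (results.foldl (fun out fp =>
      let pairs := pvFilePairs fp.2
      if pairs.isEmpty then out else out.insert fp.1 pairs)
    PySem.Dict.empty).items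

-- ===== PRECONDITION & SPEC =====
def Spec_suggest_replacements (results : List (String × List String)) (out : List (String × List (String × String))) : Prop := out = suggest_replacements_alt results
instance (results : List (String × List String)) (out : List (String × List (String × String))) : Decidable (Spec_suggest_replacements results out) := by unfold Spec_suggest_replacements; infer_instance

-- ===== CLAIM (what is proved, stated in full; the proofs are below) =====
def Claim_equal_suggest_replacements : Prop := ∀ (results : List (String × List String)), Dom_suggest_replacements results → Spec_suggest_replacements results (suggest_replacements results)

-- ===== LEMMAS AND PROOFS =====
-- folding staged map-passes = mapping the per-slot fold over the table
lemma pvFold_map_comm (L : List (String × String)) (sl : List (String × Option String)) :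
    L.foldl (fun slots ml => pvPass ml slots) sl
      = sl.map (fun x => L.foldl (fun y ml =>
          (y.1, match y.2 with
                | some s => some s
                | none =>
                    if PySem.Str.isIn ml.1 y.1 then
                      some ("AppConfig.get_path(\"" ++ ml.2 ++
                            (((PySem.Str.split? y.1 ml.1).getD []).getLastD "") ++ "\")")
                    else none)) x) := by
  induction L generalizing sl with
  | nil => simp
  | cons ml rest ih =>
      rw [List.foldl_cons, ih]
      simp only [pvPass, List.map_map]
      rfl

-- the per-slot fold over the whole table computes A's if/elif chain
lemma pvSlot_eq (p : String) :
    pvTable.foldl (fun y ml =>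
        ((y : String × Option String).1, match y.2 with
                | some s => some s
                | none =>
                    if PySem.Str.isIn ml.1 y.1 then
                      some ("AppConfig.get_path(\"" ++ ml.2 ++
                            (((PySem.Str.split? y.1 ml.1).getD []).getLastD "") ++ "\")")
                    else none)) (p, none)
      = (p, pvSuggA p) := by
  simp only [pvTable, List.foldl, pvSuggA]
  split_ifs <;> simp_all

lemma pvFilePairs_eq (paths : List String) :
    pvFilePairs paths
      = paths.filterMap (fun p => (pvSuggA p).map (fun s => (p, s))) := by
  unfold pvFilePairs
  rw [pvFold_map_comm, List.map_map, List.filterMap_map]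
  refine List.filterMap_congr ?_
  intro p _
  simp only [Function.comp_apply, pvSlot_eq]

lemma pvInner_eq (ps : List String) (acc : List (String × String)) :
    ps.foldl (fun acc path =>
        match pvSuggA path with
        | some s => acc ++ [(path, s)]
        | none => acc) acc
      = acc ++ ps.filterMap (fun p => (pvSuggA p).map (fun s => (p, s))) := by
  induction ps generalizing acc with
  | nil => simp
  | cons p rest ih =>
      simp only [List.foldl_cons, List.filterMap_cons]
      cases h : pvSuggA p <;> simp [ih]

-- the per-file step of A's outer loop equals B's per-file step
lemma pvStep_eq :
    (fun (suggestions : PySem.Dict String (List (String × String))) (fp : String × List String) =>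
      let file_suggestions := fp.2.foldl (fun acc path =>
          match pvSuggA path with
          | some s => acc ++ [(path, s)]
          | none => acc) []
      if file_suggestions.isEmpty then suggestions
      else suggestions.insert fp.1 file_suggestions)
    = (fun out fp =>
        let pairs := pvFilePairs fp.2
        if pairs.isEmpty then out else out.insert fp.1 pairs) := by
  funext d fp
  simp only [pvInner_eq fp.2 [], List.nil_append, pvFilePairs_eq]

-- ===== VERDICT (by name: the statement is the Claim_ definition above) =====
theorem suggest_replacements_spec : Claim_equal_suggest_replacements := by
  intro results _
  unfold Spec_suggest_replacements suggest_replacements suggest_replacements_alt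
  rw [pvStep_eq]
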